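-- pv_equiv track=rewrite | github.com/yuttana76/parkingApp | create_newlist.py | create_home_news
-- ===== SOURCE A (Python) =====
-- def create_home_news(news):
--     all_news = []
--     rounds = len(news)//2 +1
--     for i in range(rounds):
--         all_news.append(tuple(news[:2]))
--         news = news[2:]
--     if all_news[-1] == ():
--         all_news.pop()
--     return all_news
-- ===== SOURCE B (Python) =====
-- def create_home_news(news):
--     result = []
--     buf = []
--     for x in news:
--         buf.append(x)
--         if len(buf) == 2:
--             result.append(tuple(buf))
--             buf = []
--     if buf:
--         result.append(tuple(buf))
--     return result
-- ===== Notes on version B (the rewrite author's own statement) =====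
-- stated objective: faster
-- what changed: Replaces the rounds-counted loop that repeatedly reslices the list (news = news[2:]) with a single element-wise pass using a flush-on-full two-element buffer, removing both the len//2+1 bookkeeping and the final pop of an empty tuple.
import Mathlib
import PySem

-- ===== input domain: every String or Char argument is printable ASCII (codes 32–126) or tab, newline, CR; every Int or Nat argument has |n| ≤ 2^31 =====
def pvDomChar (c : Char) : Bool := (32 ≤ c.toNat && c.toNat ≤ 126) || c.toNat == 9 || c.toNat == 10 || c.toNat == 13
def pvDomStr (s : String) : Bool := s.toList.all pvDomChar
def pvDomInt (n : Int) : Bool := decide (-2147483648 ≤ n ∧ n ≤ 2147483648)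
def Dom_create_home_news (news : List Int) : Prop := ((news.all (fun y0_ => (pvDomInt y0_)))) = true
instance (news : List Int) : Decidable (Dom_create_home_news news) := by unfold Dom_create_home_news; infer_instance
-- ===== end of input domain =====

-- B replaces A's repeated reslicing (news = news[2:], len//2+1 rounds, pop of a trailing empty
-- tuple) by one element-wise pass with a flush-on-full buffer; objective: faster (O(n) vs O(n^2)).

-- ===== PORT A =====
-- one body of A's for-loop: append tuple(news[:2]); news = news[2:]
def pvStepA (st : List (List Int) × List Int) : List (List Int) × List Int :=
  (st.1 ++ [st.2.take 2], st.2.drop 2)    -- take 2 / drop 2 are exact for Python's news[:2] / news[2:]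

def create_home_news (news : List Int) : List (List Int) :=
  let rounds : Nat := news.length / 2 + 1          -- len(news)//2 + 1 (length ≥ 0, so Nat / matches //)
  let st := (List.range rounds).foldl (fun st _ => pvStepA st) ([], news)
  let all_news := st.1
  -- all_news[-1] == (): rounds ≥ 1 so all_news is nonempty and [-1] never raises
  if all_news.getLast? = some [] then all_news.dropLast else all_news

-- ===== PORT B =====
-- one body of B's for-loop over the elements: buf.append(x); flush when full
def pvStepB (st : List (List Int) × List Int) (x : Int) : List (List Int) × List Int :=
  let buf := st.2 ++ [x]
  if buf.length = 2 then (st.1 ++ [buf], []) else (st.1, buf)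

def create_home_news_alt (news : List Int) : List (List Int) :=
  let st := news.foldl pvStepB ([], [])
  if st.2 ≠ [] then st.1 ++ [st.2] else st.1

-- ===== PRECONDITION & SPEC =====
def Spec_create_home_news (news : List Int) (out : List (List Int)) : Prop := out = create_home_news_alt news
instance (news : List Int) (out : List (List Int)) : Decidable (Spec_create_home_news news out) := by unfold Spec_create_home_news; infer_instance

-- ===== CLAIM (what is proved, stated in full; the proofs are below) =====
def Claim_equal_create_home_news : Prop := ∀ (news : List Int), Dom_create_home_news news → Spec_create_home_news news (create_home_news news)

-- ===== LEMMAS AND PROOFS =====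

-- the common mathematical value: pairs with a trailing singleton
def pvChunk : List Int → List (List Int)
  | [] => []
  | [a] => [[a]]
  | a :: b :: rest => [a, b] :: pvChunk rest

-- A's loop ignores the range index: it is pvStepA iterated
theorem pvFoldA_iterate (l : List Nat) (init : List (List Int) × List Int) :
    l.foldl (fun st _ => pvStepA st) init = pvStepA^[l.length] init := by
  induction l generalizing init with
  | nil => rfl
  | cons x xs ih => simp [List.foldl, ih, Function.iterate_succ_apply]

def pvG : Nat → List Int → List (List Int)
  | 0, _ => []
  | r + 1, rest => rest.take 2 :: pvG r (rest.drop 2)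

theorem pvIterateA (r : Nat) (acc : List (List Int)) (rest : List Int) :
    pvStepA^[r] (acc, rest) = (acc ++ pvG r rest, rest.drop (2 * r)) := by
  induction r generalizing acc rest with
  | zero => simp [pvG]
  | succ n ih =>
      rw [Function.iterate_succ_apply, pvStepA, ih]
      simp [pvG, List.drop_drop]
      omega

theorem pvG_length (r : Nat) (rest : List Int) : (pvG r rest).length = r := by
  induction r generalizing rest with
  | zero => rfl
  | succ n ih => simp [pvG, ih]

theorem pvG_ne_nil (r : Nat) (rest : List Int) (h : 0 < r) : pvG r rest ≠ [] := by
  intro hc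
  have := pvG_length r rest
  rw [hc] at this
  simp at this
  omega

-- A's pop-if-empty on the pvG table is exactly pvChunk
theorem pvA_chunk (news : List Int) :
    (if (pvG (news.length / 2 + 1) news).getLast? = some [] then
        (pvG (news.length / 2 + 1) news).dropLast
      else pvG (news.length / 2 + 1) news) = pvChunk news := by
  induction news using pvChunk.induct with
  | case1 => simp [pvG, pvChunk]
  | case2 a => simp [pvG, pvChunk]
  | case3 a b rest ih =>
      have hlen : (a :: b :: rest).length / 2 + 1 = (rest.length / 2 + 1) + 1 := by
        simp [List.length_cons]; omega
      rw [hlen]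
      have hne := pvG_ne_nil (rest.length / 2 + 1) rest (by omega)
      have hG : pvG ((rest.length / 2 + 1) + 1) (a :: b :: rest)
          = [a, b] :: pvG (rest.length / 2 + 1) rest := by
        simp [pvG]
      obtain ⟨c, cs, hcs⟩ : ∃ c cs, pvG (rest.length / 2 + 1) rest = c :: cs := by
        cases h : pvG (rest.length / 2 + 1) rest with
        | nil => exact absurd h hne
        | cons c cs => exact ⟨c, cs, rfl⟩
      rw [hG, hcs]
      rw [hcs] at ih
      rw [pvChunk]
      simp only [List.getLast?_cons_cons, List.dropLast_cons₂]
      split_ifs at ih ⊢ with h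
      · rw [ih]
      · rw [ih]

theorem pvA_eq_chunk (news : List Int) : create_home_news news = pvChunk news := by
  simp only [create_home_news, pvFoldA_iterate, List.length_range, pvIterateA]
  simpa using pvA_chunk news

-- B's fold starting from an empty buffer produces pvChunk
theorem pvB_chunk (news : List Int) (acc : List (List Int)) :
    (let st := news.foldl pvStepB (acc, []);
     if st.2 ≠ [] then st.1 ++ [st.2] else st.1) = acc ++ pvChunk news := by
  induction news using pvChunk.induct generalizing acc with
  | case1 => simp [pvChunk]
  | case2 a => simp [pvChunk, pvStepB]
  | case3 a b rest ih =>
      have hstep : (a :: b :: rest).foldl pvStepB (acc, [])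
          = rest.foldl pvStepB (acc ++ [[a, b]], []) := by
        simp [List.foldl, pvStepB]
      simp only [hstep]
      rw [ih]
      simp [pvChunk]

theorem pvB_eq_chunk (news : List Int) : create_home_news_alt news = pvChunk news := by
  have := pvB_chunk news []
  simpa [create_home_news_alt] using this

-- ===== VERDICT (by name: the statement is the Claim_ definition above) =====
theorem create_home_news_spec : Claim_equal_create_home_news := by
  intro news _
  unfold Spec_create_home_news
  rw [pvA_eq_chunk, pvB_eq_chunk]
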